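-- pv_equiv track=rewrite | github.com/yvanlok/aoc_python | 2025/day_01/part2.py | solve
-- ===== SOURCE A (Python) =====
-- def solve(data):
--     """Solve the puzzle."""
--     lines = data.split("\n")
--
--     result = 0
--     num = 50
--
--     for line in lines:
--         direction = line[0]
--         magnitude = int(line[1::])
--
--         if direction == "L":
--             result += (num + 99) // 100 - (num - magnitude + 99) // 100
--             num = (num - magnitude) % 100
--         else:
--             result += (num + magnitude) // 100 - num // 100
--             num = (num + magnitude) % 100
--
--     return result
-- ===== SOURCE B (Python) =====
-- def solve(data):
--     """Solve the puzzle by building the signed absolute trajectory first, then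
--     counting, per traversed segment, the hundreds reached-or-passed (arrival
--     inclusive, departure exclusive) via shifted floor-division differences."""
--     moves = [(-1 if line[0] == "L" else 1, int(line[1:])) for line in data.split("\n")]
--     positions = [50]
--     for s, m in moves:
--         positions.append(positions[-1] + s * m)
--     total = 0
--     for (s, _), (a, b) in zip(moves, zip(positions, positions[1:])):
--         if s < 0:
--             total += (a - 1) // 100 - (b - 1) // 100
--         else:
--             total += b // 100 - a // 100
--     return total
-- ===== Notes on version B (the rewrite author's own statement) =====
-- stated objective: alternative
-- what changed: B drops A's modular running residue [0,100): it first builds the full signed trajectory of positions (a prefix-sum scan from 50), then sums per consecutive segment the count of multiples of 100 reached-or-passed via a uniform shifted floor-difference ((a-1)//100-(b-1)//100 leftward, b//100-a//100 rightward), instead of A's asymmetric ceil/floor formulas interleaved with % 100 updates.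
import Mathlib
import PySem

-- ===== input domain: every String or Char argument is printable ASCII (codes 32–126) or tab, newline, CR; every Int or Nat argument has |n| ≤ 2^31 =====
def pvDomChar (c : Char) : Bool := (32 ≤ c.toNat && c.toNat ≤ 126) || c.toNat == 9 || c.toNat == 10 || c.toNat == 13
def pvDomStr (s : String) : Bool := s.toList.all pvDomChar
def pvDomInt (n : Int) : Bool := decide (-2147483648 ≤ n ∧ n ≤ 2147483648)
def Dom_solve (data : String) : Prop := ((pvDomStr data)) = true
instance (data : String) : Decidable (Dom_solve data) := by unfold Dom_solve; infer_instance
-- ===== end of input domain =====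

-- B replaces A's modular running residue by the signed trajectory of positions, built first,
-- with one shifted floor-difference crossing count per traversed segment (objective: alternative).

-- ===== PORT A =====
def solve (data : String) : Int :=
  let lines := PySem.Chars.splitOn data.toList ['\n']
  (lines.foldl (fun (st : Int × Int) line =>
      match PySem.List.pyGet? line 0, PySem.Int.ofChars? (PySem.List.slice line (some 1) none) with
      | some direction, some magnitude =>
        if direction == 'L' then
          (st.1 + PySem.Int.floordiv (st.2 + 99) 100 - PySem.Int.floordiv (st.2 - magnitude + 99) 100,
           PySem.Int.mod (st.2 - magnitude) 100)
        else
          (st.1 + PySem.Int.floordiv (st.2 + magnitude) 100 - PySem.Int.floordiv st.2 100,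
           PySem.Int.mod (st.2 + magnitude) 100)
      | _, _ => st           -- unreachable under Pre_solve (IndexError / ValueError)
      ) ((0 : Int), (50 : Int))).1

-- ===== PORT B =====
def solve_alt (data : String) : Int :=
  let lines := PySem.Chars.splitOn data.toList ['\n']
  let moves : List (Int × Int) := lines.map (fun line =>
      ((if PySem.List.pyGetD line 0 ' ' == 'L' then (-1 : Int) else 1),
       (PySem.Int.ofChars? (PySem.List.slice line (some 1) none)).getD 0))
  let positions := moves.foldl
      (fun ps sm => ps ++ [PySem.List.pyGetD ps (-1) 0 + sm.1 * sm.2]) [(50 : Int)]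
  (moves.zip (positions.zip (PySem.List.slice positions (some 1) none))).foldl
    (fun total x =>
      if x.1.1 < 0 then
        total + PySem.Int.floordiv (x.2.1 - 1) 100 - PySem.Int.floordiv (x.2.2 - 1) 100
      else
        total + PySem.Int.floordiv x.2.2 100 - PySem.Int.floordiv x.2.1 100) 0

-- ===== PRECONDITION & SPEC =====
-- Pre_ excludes exactly the inputs where A raises: an empty line (IndexError on line[0])
-- or a rest-of-line that int() rejects (ValueError).
def Pre_solve (data : String) : Prop :=
  ∀ line ∈ PySem.Chars.splitOn data.toList ['\n'],
    line ≠ [] ∧ PySem.Int.ofChars? (PySem.List.slice line (some 1) none) ≠ none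

instance (data : String) : Decidable (Pre_solve data) := by unfold Pre_solve; infer_instance

def pvWitness_solve : String := "L5\nR120"

def Spec_solve (data : String) (out : Int) : Prop := out = solve_alt data
instance (data : String) (out : Int) : Decidable (Spec_solve data out) := by unfold Spec_solve; infer_instance

-- ===== CLAIM (what is proved, stated in full; the proofs are below) =====
def Claim_equal_solve : Prop := ∀ (data : String), Dom_solve data → Pre_solve data → Spec_solve data (solve data)

-- ===== LEMMAS AND PROOFS =====

-- the trajectory of positions from p through the moves
def scanPos (p : Int) : List (Int × Int) → List Int
  | [] => [p]
  | sm :: ms => p :: scanPos (p + sm.1 * sm.2) ms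

-- segment-wise crossing total, as a recursion over the moves
def segTotal : List (Int × Int) → Int → Int
  | [], _ => 0
  | sm :: ms, p =>
      (if sm.1 < 0 then
        PySem.Int.floordiv (p - 1) 100 - PySem.Int.floordiv (p + sm.1 * sm.2 - 1) 100
      else
        PySem.Int.floordiv (p + sm.1 * sm.2) 100 - PySem.Int.floordiv p 100)
      + segTotal ms (p + sm.1 * sm.2)

lemma pos_build (ms : List (Int × Int)) :
    ∀ (pre : List Int) (p : Int),
    ms.foldl (fun ps sm => ps ++ [PySem.List.pyGetD ps (-1) 0 + sm.1 * sm.2]) (pre ++ [p])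
      = pre ++ scanPos p ms := by
  induction ms with
  | nil => intro pre p; simp [scanPos]
  | cons sm ms ih =>
    intro pre p
    simp only [List.foldl_cons, PySem.List.pyGetD_neg_one_append_singleton, scanPos]
    rw [ih (pre ++ [p])]
    simp

lemma scanPos_head (p : Int) (ms : List (Int × Int)) :
    scanPos p ms = p :: (scanPos p ms).tail := by
  cases ms <;> simp [scanPos]

lemma seg_fold (ms : List (Int × Int)) :
    ∀ (p t : Int),
    ((ms.zip ((scanPos p ms).zip (scanPos p ms).tail)).foldl
      (fun total x =>
        if x.1.1 < 0 then
          total + PySem.Int.floordiv (x.2.1 - 1) 100 - PySem.Int.floordiv (x.2.2 - 1) 100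
        else
          total + PySem.Int.floordiv x.2.2 100 - PySem.Int.floordiv x.2.1 100) t)
      = t + segTotal ms p := by
  induction ms with
  | nil => intro p t; simp [scanPos, segTotal]
  | cons sm ms ih =>
    intro p t
    simp only [scanPos]
    rw [scanPos_head (p + sm.1 * sm.2) ms]
    simp only [List.tail_cons, List.zip_cons_cons, List.foldl_cons]
    rw [← scanPos_head, ih, segTotal]
    split_ifs <;> ring

lemma modL (p m : Int) :
    PySem.Int.mod (PySem.Int.mod p 100 - m) 100 = PySem.Int.mod (p - m) 100 := by
  rw [PySem.Int.mod_eq_emod_of_pos (a := p) (by norm_num),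
      PySem.Int.mod_eq_emod_of_pos (by norm_num), PySem.Int.mod_eq_emod_of_pos (by norm_num)]
  omega

lemma modR (p m : Int) :
    PySem.Int.mod (PySem.Int.mod p 100 + m) 100 = PySem.Int.mod (p + m) 100 := by
  rw [PySem.Int.mod_eq_emod_of_pos (a := p) (by norm_num),
      PySem.Int.mod_eq_emod_of_pos (by norm_num), PySem.Int.mod_eq_emod_of_pos (by norm_num)]
  omega

lemma crossL (p m : Int) :
    PySem.Int.floordiv (PySem.Int.mod p 100 + 99) 100
      - PySem.Int.floordiv (PySem.Int.mod p 100 - m + 99) 100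
    = PySem.Int.floordiv (p - 1) 100 - PySem.Int.floordiv (p - m - 1) 100 := by
  rw [PySem.Int.mod_eq_emod_of_pos (by norm_num),
      PySem.Int.floordiv_eq_ediv_of_pos (by norm_num),
      PySem.Int.floordiv_eq_ediv_of_pos (by norm_num),
      PySem.Int.floordiv_eq_ediv_of_pos (by norm_num),
      PySem.Int.floordiv_eq_ediv_of_pos (by norm_num)]
  omega

lemma crossR (p m : Int) :
    PySem.Int.floordiv (PySem.Int.mod p 100 + m) 100
      - PySem.Int.floordiv (PySem.Int.mod p 100) 100
    = PySem.Int.floordiv (p + m) 100 - PySem.Int.floordiv p 100 := by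
  rw [PySem.Int.mod_eq_emod_of_pos (by norm_num),
      PySem.Int.floordiv_eq_ediv_of_pos (by norm_num),
      PySem.Int.floordiv_eq_ediv_of_pos (by norm_num),
      PySem.Int.floordiv_eq_ediv_of_pos (by norm_num),
      PySem.Int.floordiv_eq_ediv_of_pos (by norm_num)]
  omega

lemma main_bridge (lines : List (List Char)) :
    (∀ l ∈ lines, l ≠ [] ∧ PySem.Int.ofChars? (PySem.List.slice l (some 1) none) ≠ none) →
    ∀ (r p : Int),
    ((lines.foldl (fun (st : Int × Int) line =>
      match PySem.List.pyGet? line 0, PySem.Int.ofChars? (PySem.List.slice line (some 1) none) with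
      | some direction, some magnitude =>
        if direction == 'L' then
          (st.1 + PySem.Int.floordiv (st.2 + 99) 100 - PySem.Int.floordiv (st.2 - magnitude + 99) 100,
           PySem.Int.mod (st.2 - magnitude) 100)
        else
          (st.1 + PySem.Int.floordiv (st.2 + magnitude) 100 - PySem.Int.floordiv st.2 100,
           PySem.Int.mod (st.2 + magnitude) 100)
      | _, _ => st) (r, PySem.Int.mod p 100)).1)
      = r + segTotal (lines.map (fun line =>
          ((if PySem.List.pyGetD line 0 ' ' == 'L' then (-1 : Int) else 1),
           (PySem.Int.ofChars? (PySem.List.slice line (some 1) none)).getD 0))) p := by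
  induction lines with
  | nil => intro _ r p; simp [segTotal]
  | cons line rest ih =>
    intro h r p
    obtain ⟨hne, hint⟩ := h _ (List.mem_cons_self ..)
    obtain ⟨c, cs, rfl⟩ : ∃ c cs, line = c :: cs := by
      cases line with
      | nil => exact absurd rfl hne
      | cons c cs => exact ⟨c, cs, rfl⟩
    obtain ⟨m, hm⟩ := Option.ne_none_iff_exists'.mp hint
    simp only [List.foldl_cons, List.map_cons, hm, PySem.List.pyGet?_zero_cons,
      PySem.List.pyGetD_zero_cons, Option.getD_some, segTotal]
    by_cases hc : c = 'L'
    · simp only [hc, beq_self_eq_true, if_pos]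
      rw [modL, ih (fun l hl => h l (List.mem_cons_of_mem _ hl))]
      have : (-1 : Int) * m = -m := by ring
      simp only [this, ← sub_eq_add_neg]
      rw [if_pos (by norm_num)]
      linear_combination crossL p m
    · have hbeq : (c == 'L') = false := by simp [hc]
      simp only [hbeq, if_false, Bool.false_eq_true]
      rw [modR, ih (fun l hl => h l (List.mem_cons_of_mem _ hl))]
      simp only [one_mul]
      rw [if_neg (by norm_num)]
      linear_combination crossR p m

-- ===== VERDICT (by name: the statement is the Claim_ definition above) =====
theorem solve_spec : Claim_equal_solve := by
  intro data _hdom hpre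
  unfold Spec_solve solve solve_alt
  simp only []
  have hb := main_bridge (PySem.Chars.splitOn data.toList ['\n']) hpre 0 50
  rw [show PySem.Int.mod 50 100 = (50 : Int) from by decide] at hb
  rw [show ([(50 : Int)]) = ([] : List Int) ++ [(50 : Int)] from rfl, pos_build,
      List.nil_append, PySem.List.slice_from_one, seg_fold, hb]
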